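-- pv_equiv track=rewrite | github.com/rroemhild/SleekBot | sleekbot/users.py | parts_of
-- ===== SOURCE A (Python) =====
-- def parts_of(address):
--     """ Given an e-mail address, generates al possible domains."""
--     yield address
--     if '@' in address:
--         (pre, dom) = address.split('@', 1)
--         yield dom
--         while '.' in dom:
--             (pre, dom) = dom.split(".", 1)
--             yield dom
-- ===== SOURCE B (Python) =====
-- def parts_of(address):
--     """ Given an e-mail address, generates al possible domains."""
--     yield address
--     if '@' in address:
--         dom = address.split('@', 1)[1]
--         parts = dom.split('.')
--         for i in range(len(parts)):
--             yield '.'.join(parts[i:])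
-- ===== Notes on version B (the rewrite author's own statement) =====
-- stated objective: idiomatic
-- what changed: A strips the domain with a while-loop of repeated first-separator splits on a shrinking string; B splits the domain into its dot-separated components once and yields the join of each suffix of that component list.
import Mathlib
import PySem

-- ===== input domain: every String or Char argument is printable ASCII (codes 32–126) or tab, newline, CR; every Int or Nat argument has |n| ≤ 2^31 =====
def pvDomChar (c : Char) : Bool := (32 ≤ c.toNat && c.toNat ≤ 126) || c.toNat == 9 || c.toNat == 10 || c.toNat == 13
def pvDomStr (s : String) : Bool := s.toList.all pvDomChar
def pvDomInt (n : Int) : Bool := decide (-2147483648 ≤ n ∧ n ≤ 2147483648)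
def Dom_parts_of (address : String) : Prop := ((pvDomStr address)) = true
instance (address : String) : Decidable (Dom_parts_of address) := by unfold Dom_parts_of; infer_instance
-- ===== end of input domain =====

-- B replaces A's while-loop of repeated first-'.' splits on a shrinking string by one split('.')
-- plus an index loop joining the suffixes (idiomatic decomposition; same cost).
-- Both Pythons are generators; the ports return the list of yielded values.

-- ===== PORT A =====
-- Helpers and lemmas needed by port A's termination proof (they characterise s.split(c, 1)):
-- pvConsHead x ps prepends x onto the first piece of ps.
def pvConsHead (x : List Char) : List (List Char) → List (List Char)
  | [] => [x]
  | p :: ps => (x ++ p) :: ps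

-- pvSplit1 c l = l.split(c, 1) (on lists of chars); used only in proofs / termination, not by the ports.
def pvSplit1 (c : Char) : List Char → List (List Char)
  | [] => [[]]
  | a :: r => if a = c then [[], r] else pvConsHead [a] (pvSplit1 c r)

theorem pvConsHead_consHead (x y : List Char) (ps : List (List Char)) :
    pvConsHead x (pvConsHead y ps) = pvConsHead (x ++ y) ps := by
  cases ps <;> simp [pvConsHead]

theorem pvSplit1_ne_nil (c : Char) (l : List Char) : pvSplit1 c l ≠ [] := by
  cases l with
  | nil => simp [pvSplit1]
  | cons a r =>
    simp only [pvSplit1]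
    split_ifs
    · simp
    · cases h : pvSplit1 c r <;> simp [pvConsHead]

theorem pvConsHead_nil {ps : List (List Char)} (h : ps ≠ []) : pvConsHead [] ps = ps := by
  cases ps with
  | nil => exact absurd rfl h
  | cons p ps => simp [pvConsHead]

-- splitOnMax.go with maxsplit budget 0 returns the rest as one piece
theorem pvGo0 (c : Char) (fuel : ℕ) (l cur : List Char) (acc : List (List Char)) :
    PySem.Chars.splitOnMax.go [c] fuel 0 l cur acc = acc.reverse ++ [cur.reverse ++ l] := by
  cases fuel <;> cases l <;> simp [PySem.Chars.splitOnMax.go]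

-- splitOnMax.go with budget 1 computes pvSplit1
theorem pvGo1 (c : Char) : ∀ (fuel : ℕ) (l cur : List Char) (acc : List (List Char)),
    l.length < fuel →
    PySem.Chars.splitOnMax.go [c] fuel 1 l cur acc
      = acc.reverse ++ pvConsHead cur.reverse (pvSplit1 c l) := by
  intro fuel
  induction fuel with
  | zero => intro l cur acc h; omega
  | succ n ih =>
    intro l cur acc h
    cases l with
    | nil => simp [PySem.Chars.splitOnMax.go, pvSplit1, pvConsHead]
    | cons a r =>
      simp only [PySem.Chars.splitOnMax.go]
      rw [if_neg (by decide)]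
      by_cases hac : a = c
      · subst hac
        rw [if_pos (by simp [List.isPrefixOf])]
        rw [pvGo0]
        simp [pvSplit1, pvConsHead]
      · rw [if_neg (by simp [List.isPrefixOf, Ne.symm hac])]
        rw [ih r (a :: cur) acc (by simpa using Nat.lt_of_succ_lt_succ h)]
        simp only [pvSplit1, if_neg hac, List.reverse_cons, pvConsHead_consHead]

theorem pvSplitOnMax_eq (c : Char) (l : List Char) :
    PySem.Chars.splitOnMax l [c] 1 = pvSplit1 c l := by
  unfold PySem.Chars.splitOnMax
  rw [if_neg (by norm_num)]
  have h1 : (1 : ℤ).toNat = 1 := rfl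
  rw [h1, pvGo1 c (l.length + 1) l [] [] (by omega)]
  simp [pvConsHead_nil (pvSplit1_ne_nil c l)]

theorem pv_isIn_mem (c : Char) (l : List Char) :
    PySem.Chars.isIn [c] l = true ↔ c ∈ l := by
  rw [PySem.Chars.isIn_iff_infix]
  constructor
  · intro h; exact List.singleton_sublist.mp h.sublist
  · intro h
    obtain ⟨s, t, rfl⟩ := List.append_of_mem h
    exact ⟨s, t, by simp⟩

theorem pvSplit1_of_mem (c : Char) : ∀ (l : List Char), c ∈ l →
    ∃ pre suf, pvSplit1 c l = [pre, suf] ∧ l = pre ++ c :: suf ∧ c ∉ pre := by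
  intro l
  induction l with
  | nil => simp
  | cons a r ih =>
    intro h
    by_cases hac : a = c
    · exact ⟨[], r, by simp [pvSplit1, hac], by simp [hac], by simp⟩
    · have hc : c ∈ r := by
        rcases List.mem_cons.mp h with h' | h'
        · exact absurd h'.symm hac
        · exact h'
      obtain ⟨pre, suf, h1, h2, h3⟩ := ih hc
      refine ⟨a :: pre, suf, ?_, by simp [h2], ?_⟩
      · simp [pvSplit1, hac, h1, pvConsHead]
      · simp only [List.mem_cons, not_or]
        exact ⟨fun hh => hac hh.symm, h3⟩

theorem pv_loop_dec (dom : List Char) (h : PySem.Chars.isIn ['.'] dom = true) :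
    ((PySem.Chars.splitOnMax dom ['.'] 1).getD 1 []).length < dom.length := by
  obtain ⟨pre, suf, h1, h2, _⟩ := pvSplit1_of_mem '.' dom ((pv_isIn_mem '.' dom).mp h)
  rw [pvSplitOnMax_eq, h1, h2]
  simp
  omega

-- the while-loop of A: while '.' in dom: (pre, dom) = dom.split('.', 1); yield dom
def parts_of_loop (dom : List Char) : List String :=
  if h : PySem.Chars.isIn ['.'] dom = true then
    String.ofList ((PySem.Chars.splitOnMax dom ['.'] 1).getD 1 []) ::
      parts_of_loop ((PySem.Chars.splitOnMax dom ['.'] 1).getD 1 [])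
  else []
termination_by dom.length
decreasing_by exact pv_loop_dec dom h

def parts_of (address : String) : List String :=
  address ::
    (if PySem.Str.isIn "@" address then
      String.ofList ((PySem.Chars.splitOnMax address.toList ['@'] 1).getD 1 []) ::
        parts_of_loop ((PySem.Chars.splitOnMax address.toList ['@'] 1).getD 1 [])
    else [])

-- ===== PORT B =====
def parts_of_alt (address : String) : List String :=
  let out : List String := [address]
  if PySem.Str.isIn "@" address then
    let dom := (PySem.Chars.splitOnMax address.toList ['@'] 1).getD 1 []
    let parts := PySem.Chars.splitOn dom ['.']
    out ++ (PySem.List.pyRange 0 parts.length 1).map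
      (fun i => String.ofList (PySem.Chars.join ['.'] (PySem.List.slice parts (some i) none)))
  else out

-- ===== PRECONDITION & SPEC =====
def Spec_parts_of (address : String) (out : List String) : Prop := out = parts_of_alt address
instance (address : String) (out : List String) : Decidable (Spec_parts_of address out) := by unfold Spec_parts_of; infer_instance

-- ===== CLAIM (what is proved, stated in full; the proofs are below) =====
def Claim_equal_parts_of : Prop := ∀ (address : String), Dom_parts_of address → Spec_parts_of address (parts_of address)

-- ===== LEMMAS AND PROOFS =====
-- pvSplitAll c l = l.split(c) (no maxsplit)
def pvSplitAll (c : Char) : List Char → List (List Char)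
  | [] => [[]]
  | a :: r => if a = c then [] :: pvSplitAll c r else pvConsHead [a] (pvSplitAll c r)

theorem pvSplitAll_ne_nil (c : Char) (l : List Char) : pvSplitAll c l ≠ [] := by
  cases l with
  | nil => simp [pvSplitAll]
  | cons a r =>
    simp only [pvSplitAll]
    split_ifs
    · simp
    · cases h : pvSplitAll c r <;> simp [pvConsHead]

theorem pvGoAll (c : Char) : ∀ (fuel : ℕ) (l cur : List Char) (acc : List (List Char)),
    l.length < fuel →
    PySem.Chars.splitOn.go [c] fuel l cur acc
      = acc.reverse ++ pvConsHead cur.reverse (pvSplitAll c l) := by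
  intro fuel
  induction fuel with
  | zero => intro l cur acc h; omega
  | succ n ih =>
    intro l cur acc h
    cases l with
    | nil => simp [PySem.Chars.splitOn.go, pvSplitAll, pvConsHead]
    | cons a r =>
      simp only [PySem.Chars.splitOn.go]
      by_cases hac : a = c
      · subst hac
        rw [if_pos (by simp [List.isPrefixOf])]
        rw [show List.drop [a].length (a :: r) = r from by simp]
        rw [ih r [] (cur.reverse :: acc) (by simpa using Nat.lt_of_succ_lt_succ h)]
        simp [pvSplitAll, pvConsHead]
        cases hx : pvSplitAll a r with
        | nil => exact absurd hx (pvSplitAll_ne_nil a r)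
        | cons p ps => simp
      · rw [if_neg (by simp [List.isPrefixOf, Ne.symm hac])]
        rw [ih r (a :: cur) acc (by simpa using Nat.lt_of_succ_lt_succ h)]
        simp only [pvSplitAll, if_neg hac, List.reverse_cons, pvConsHead_consHead]

theorem pvSplitOn_eq (c : Char) (l : List Char) :
    PySem.Chars.splitOn l [c] = pvSplitAll c l := by
  unfold PySem.Chars.splitOn
  rw [pvGoAll c (l.length + 1) l [] [] (by omega)]
  simp [pvConsHead_nil (pvSplitAll_ne_nil c l)]

theorem pvInter_cons (s p q : List Char) (qs : List (List Char)) :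
    List.intercalate s (p :: q :: qs) = p ++ s ++ List.intercalate s (q :: qs) := by
  simp [List.intercalate, List.intersperse]

theorem pvInter_single (s p : List Char) : List.intercalate s [p] = p := by
  simp [List.intercalate]

theorem pvInter_cons' (s : List Char) (a : Char) (p : List Char) (ps : List (List Char)) :
    List.intercalate s ((a :: p) :: ps) = a :: List.intercalate s (p :: ps) := by
  cases ps with
  | nil => simp [List.intercalate]
  | cons q qs => rw [pvInter_cons, pvInter_cons]; simp

theorem pvJoin_splitAll (c : Char) : ∀ (l : List Char),
    PySem.Chars.join [c] (pvSplitAll c l) = l := by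
  intro l
  induction l with
  | nil => simp [pvSplitAll, PySem.Chars.join, List.intercalate]
  | cons a r ih =>
    by_cases hac : a = c
    · subst hac
      obtain ⟨p, ps, hps⟩ := List.exists_cons_of_ne_nil (pvSplitAll_ne_nil a r)
      rw [show pvSplitAll a (a :: r) = [] :: pvSplitAll a r from by simp [pvSplitAll]]
      rw [hps, PySem.Chars.join, pvInter_cons]
      rw [hps, PySem.Chars.join] at ih
      simp [ih]
    · obtain ⟨p, ps, hps⟩ := List.exists_cons_of_ne_nil (pvSplitAll_ne_nil c r)
      rw [show pvSplitAll c (a :: r) = pvConsHead [a] (pvSplitAll c r) from by simp [pvSplitAll, hac]]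
      rw [hps]
      show PySem.Chars.join [c] ((a :: p) :: ps) = a :: r
      rw [PySem.Chars.join, pvInter_cons']
      rw [hps, PySem.Chars.join] at ih
      rw [ih]

theorem pvSplitAll_of_not_mem (c : Char) (l : List Char) (h : c ∉ l) :
    pvSplitAll c l = [l] := by
  induction l with
  | nil => simp [pvSplitAll]
  | cons a r ih =>
    simp only [List.mem_cons, not_or] at h
    have hac : ¬ a = c := fun hh => h.1 hh.symm
    rw [show pvSplitAll c (a :: r) = pvConsHead [a] (pvSplitAll c r) from by simp [pvSplitAll, hac]]
    rw [ih h.2]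
    simp [pvConsHead]

theorem pvSplitAll_decomp (c : Char) (suf : List Char) : ∀ (pre : List Char), c ∉ pre →
    pvSplitAll c (pre ++ c :: suf) = pre :: pvSplitAll c suf := by
  intro pre
  induction pre with
  | nil => intro _; simp [pvSplitAll]
  | cons a p ih =>
    intro h
    simp only [List.mem_cons, not_or] at h
    have hac : ¬ a = c := fun hh => h.1 hh.symm
    rw [List.cons_append]
    rw [show pvSplitAll c (a :: (p ++ c :: suf)) = pvConsHead [a] (pvSplitAll c (p ++ c :: suf))
        from by simp [pvSplitAll, hac]]
    rw [ih h.2]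
    simp [pvConsHead]

-- the heart of the equivalence: A's while-loop lists exactly the '.'-suffix joins
theorem pv_loop_char : ∀ (n : ℕ) (dom : List Char), dom.length ≤ n →
    String.ofList dom :: parts_of_loop dom =
      (List.range (pvSplitAll '.' dom).length).map
        (fun i => String.ofList (PySem.Chars.join ['.'] ((pvSplitAll '.' dom).drop i))) := by
  intro n
  induction n with
  | zero =>
    intro dom hl
    have hdom : dom = [] := List.eq_nil_of_length_eq_zero (Nat.le_zero.mp hl)
    subst hdom
    rw [parts_of_loop, dif_neg (by rw [pv_isIn_mem]; simp)]
    simp [pvSplitAll, PySem.Chars.join, pvInter_single]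
  | succ n ih =>
    intro dom hl
    by_cases hd : PySem.Chars.isIn ['.'] dom = true
    · obtain ⟨pre, suf, h1, h2, h3⟩ := pvSplit1_of_mem '.' dom ((pv_isIn_mem '.' dom).mp hd)
      rw [parts_of_loop, dif_pos hd, pvSplitOnMax_eq, h1]
      have hg : ([pre, suf] : List (List Char)).getD 1 [] = suf := rfl
      rw [hg]
      subst h2
      have hsl : suf.length ≤ n := by
        rw [List.length_append, List.length_cons] at hl; omega
      have ihs := ih suf hsl
      rw [pvSplitAll_decomp '.' suf pre h3]
      simp only [List.length_cons]
      rw [List.range_succ_eq_map]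
      simp only [List.map_cons, List.map_map, List.drop_zero]
      refine List.cons_eq_cons.mpr ⟨?_, ?_⟩
      · rw [show (pre :: pvSplitAll '.' suf) = pvSplitAll '.' (pre ++ '.' :: suf)
            from (pvSplitAll_decomp '.' suf pre h3).symm, pvJoin_splitAll]
      · rw [ihs]
        apply List.map_congr_left
        intro i _
        simp [Function.comp, List.drop_succ_cons]
    · rw [parts_of_loop, dif_neg hd]
      have hnm : '.' ∉ dom := fun hm => hd ((pv_isIn_mem _ _).mpr hm)
      rw [pvSplitAll_of_not_mem _ _ hnm]
      simp [PySem.Chars.join, pvInter_single]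

-- ===== VERDICT (by name: the statement is the Claim_ definition above) =====
theorem parts_of_spec : Claim_equal_parts_of := by
  intro address _
  show parts_of address = parts_of_alt address
  by_cases h : PySem.Str.isIn "@" address = true
  · simp only [parts_of, parts_of_alt, h, if_pos]
    rw [pvSplitOn_eq]
    rw [PySem.List.pyRange_zero_nat]
    rw [List.map_map]
    simp only [List.singleton_append, Function.comp_def, PySem.List.slice_from_natCast]
    congr 1
    exact pv_loop_char _ _ le_rfl
  · simp only [parts_of, parts_of_alt, h]
    simp
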